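-- pv_equiv track=rewrite | github.com/microsoft/text-to-sql-schema-expansion-generalization | smbop/smbop/dataset_readers/spider.py | table_text_encoding
-- ===== SOURCE A (Python) =====
-- def table_text_encoding(entity_text_list):
--     token_list = []
--     mask_list = []
--     for i, curr in enumerate(entity_text_list):
--         if ":" in curr:  # col
--             token_list.append(curr)
--             if (i + 1) < len(entity_text_list) and ":" in entity_text_list[i + 1]:
--                 token_list.append(",")
--             else:
--                 token_list.append(")\n")
--             mask_list.extend([True, False])
--         else:
--             token_list.append(curr)
--             token_list.append("(")
--             mask_list.extend([True, False])
--
--     return token_list, mask_list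
-- ===== SOURCE B (Python) =====
-- def table_text_encoding(entity_text_list):
--     # Run-based consumer: a table name emits "name (", a maximal run of
--     # columns is joined with "," and closed with ")\n".  The list is consumed
--     # front-first via a reversed working stack (pop() is O(1)).
--     tokens = []
--     rest = entity_text_list[::-1]
--     while rest:
--         head = rest.pop()
--         if ":" not in head:
--             tokens += [head, "("]
--         else:
--             run = [head]
--             while rest and ":" in rest[-1]:
--                 run.append(rest.pop())
--             for c in run[:-1]:
--                 tokens += [c, ","]
--             tokens += [run[-1], ")\n"]
--     return tokens, [True, False] * len(entity_text_list)
-- ===== Notes on version B (the rewrite author's own statement) =====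
-- stated objective: alternative
-- what changed: Replaces the index-driven lookahead loop by a run-based consumer: the list is segmented into single table names and maximal runs of columns, each column run is joined with ',' and closed with ')\n', and the mask is the closed form [True, False] * len(list).
import Mathlib
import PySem

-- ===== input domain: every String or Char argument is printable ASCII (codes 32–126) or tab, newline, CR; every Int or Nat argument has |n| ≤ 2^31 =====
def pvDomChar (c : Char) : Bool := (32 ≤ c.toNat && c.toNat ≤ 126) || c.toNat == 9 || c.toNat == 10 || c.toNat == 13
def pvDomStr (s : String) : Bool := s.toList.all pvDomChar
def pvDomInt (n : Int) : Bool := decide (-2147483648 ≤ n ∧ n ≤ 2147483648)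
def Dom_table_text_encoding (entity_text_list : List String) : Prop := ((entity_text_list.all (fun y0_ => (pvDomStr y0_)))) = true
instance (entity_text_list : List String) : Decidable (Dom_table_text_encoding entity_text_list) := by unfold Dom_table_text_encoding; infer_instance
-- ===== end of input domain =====

-- B replaces A's index-driven lookahead loop by a run-based consumer (maximal
-- column runs joined with "," and closed with ")\n") plus a closed-form mask.

-- ===== PORT A =====
def table_text_encoding (entity_text_list : List String) : List String × List Bool :=
  (PySem.List.enumerate entity_text_list).foldl
    (fun (st : List String × List Bool) p =>
      if PySem.Str.isIn ":" p.2 then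
        (st.1 ++ [p.2] ++
          (if p.1 + 1 < (entity_text_list.length : Int) ∧
              PySem.Str.isIn ":" (PySem.List.pyGetD entity_text_list (p.1 + 1) "") = true
           then [","] else [")\n"]),
         st.2 ++ [true, false])
      else
        (st.1 ++ [p.2] ++ ["("], st.2 ++ [true, false]))
    ([], [])

-- ===== PORT B =====
def pvIsCol (s : String) : Bool := PySem.Str.isIn ":" s

-- emission of one collected run: run[:-1] joined with ",", last closed with ")\n"
def altRun : List String → List String
  | [] => []
  | [c] => [c, ")\n"]
  | c :: c2 :: rest => c :: "," :: altRun (c2 :: rest)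

-- the outer while loop of B: peel head; a column head collects the maximal
-- leading column run of the remainder (the inner while = takeWhile/dropWhile)
def altGen : List String → List String
  | [] => []
  | x :: xs =>
    if pvIsCol x then
      altRun (x :: xs.takeWhile pvIsCol) ++ altGen (xs.dropWhile pvIsCol)
    else x :: "(" :: altGen xs
termination_by l => l.length
decreasing_by
  · have := List.length_dropWhile_le pvIsCol xs; simp; omega
  · simp

def table_text_encoding_alt (entity_text_list : List String) : List String × List Bool :=
  (altGen entity_text_list, (List.replicate entity_text_list.length [true, false]).flatten)

-- ===== PRECONDITION & SPEC =====
def Spec_table_text_encoding (entity_text_list : List String) (out : List String × List Bool) : Prop := out = table_text_encoding_alt entity_text_list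
instance (entity_text_list : List String) (out : List String × List Bool) : Decidable (Spec_table_text_encoding entity_text_list out) := by unfold Spec_table_text_encoding; infer_instance

-- ===== CLAIM (what is proved, stated in full; the proofs are below) =====
def Claim_equal_table_text_encoding : Prop := ∀ (entity_text_list : List String), Dom_table_text_encoding entity_text_list → Spec_table_text_encoding entity_text_list (table_text_encoding entity_text_list)

-- ===== LEMMAS AND PROOFS =====

-- the common token stream, as a structural recursion with one-step lookahead
def specTok : List String → List String
  | [] => []
  | [x] => x :: (if pvIsCol x then [")\n"] else ["("])
  | x :: y :: rest =>
      (x :: (if pvIsCol x then (if pvIsCol y then [","] else [")\n"]) else ["("]))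
        ++ specTok (y :: rest)

-- A's per-entry token contribution
def gtokA (full : List String) (p : Int × String) : List String :=
  [p.2] ++
    (if p.1 + 1 < (full.length : Int) ∧
        PySem.Str.isIn ":" (PySem.List.pyGetD full (p.1 + 1) "") = true
     then (if pvIsCol p.2 then [","] else ["("])
     else (if pvIsCol p.2 then [")\n"] else ["("]))

theorem foldA_eq (full : List String) :
    ∀ (l : List (Int × String)) (acc : List String × List Bool),
    l.foldl
      (fun (st : List String × List Bool) p =>
        if PySem.Str.isIn ":" p.2 then
          (st.1 ++ [p.2] ++
            (if p.1 + 1 < (full.length : Int) ∧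
                PySem.Str.isIn ":" (PySem.List.pyGetD full (p.1 + 1) "") = true
             then [","] else [")\n"]),
           st.2 ++ [true, false])
        else
          (st.1 ++ [p.2] ++ ["("], st.2 ++ [true, false])) acc
    = (acc.1 ++ l.flatMap (gtokA full),
       acc.2 ++ (List.replicate l.length [true, false]).flatten) := by
  intro l
  induction l with
  | nil => intro acc; simp
  | cons p t ih =>
      intro acc
      simp only [List.foldl_cons, List.flatMap_cons, List.length_cons, List.replicate_succ,
        List.flatten_cons]
      by_cases h : PySem.Str.isIn ":" p.2
      · simp only [h, if_true, ih, gtokA, pvIsCol]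
        by_cases hc : p.1 + 1 < (full.length : Int) ∧
            PySem.Str.isIn ":" (PySem.List.pyGetD full (p.1 + 1) "") = true
        · simp [hc]
        · simp
      · simp only [h, ih, gtokA, pvIsCol]
        by_cases hc : p.1 + 1 < (full.length : Int) ∧
            PySem.Str.isIn ":" (PySem.List.pyGetD full (p.1 + 1) "") = true
        · simp
        · simp

theorem tokA_eq (full : List String) :
    ∀ (l : List String) (s : Nat), full.drop s = l →
    (PySem.List.enumerate l (s : Int)).flatMap (gtokA full) = specTok l := by
  intro l
  induction l with
  | nil => intro s _; simp [PySem.List.enumerate_nil, specTok]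
  | cons x t ih =>
      intro s hdrop
      have hlen : full.length = s + t.length + 1 := by
        have h1 := congrArg List.length hdrop
        rw [List.length_drop] at h1
        have h2 : s ≤ full.length := by
          by_contra h
          rw [List.drop_eq_nil_of_le (by omega)] at hdrop
          simp at hdrop
        simp at h1
        omega
      have hdropt : full.drop (s + 1) = t := by
        rw [← List.drop_drop, hdrop]
        rfl
      rw [PySem.List.enumerate_cons, List.flatMap_cons]
      cases t with
      | nil =>
          have hnotlt : ¬ ((s : Int) + 1 < (full.length : Int)) := by
            simp at hlen
            omega
          simp only [PySem.List.enumerate_nil, List.flatMap_nil, List.append_nil]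
          simp [gtokA, specTok, hnotlt]
      | cons y r =>
          have hlt : (s : Int) + 1 < (full.length : Int) := by
            simp at hlen
            omega
          have hy : PySem.List.pyGetD full ((s : Int) + 1) "" = y := by
            rw [show ((s : Int) + 1) = ((s + 1 : Nat) : Int) by push_cast; ring]
            rw [PySem.List.pyGetD_natCast, List.getD_eq_getElem?_getD]
            have hd := List.getElem?_drop (xs := full) (i := s + 1) (j := 0)
            simp only [Nat.add_zero] at hd
            rw [← hd, hdropt]
            rfl
          have ih' := ih (s + 1) hdropt
          push_cast at ih'
          rw [ih']
          show gtokA full ((s : Int), x) ++ specTok (y :: r) = specTok (x :: y :: r)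
          simp only [gtokA, specTok, hy, hlt, true_and, pvIsCol]
          by_cases hx : PySem.Chars.isIn [':'] x.toList = true <;>
            by_cases hyc : PySem.Chars.isIn [':'] y.toList = true <;>
            simp [hx, hyc]

-- B's run-based pass produces the same token stream
theorem altGen_eq_aux : ∀ (n : Nat) (l : List String), l.length ≤ n → altGen l = specTok l := by
  intro n
  induction n with
  | zero =>
      intro l hl
      have : l = [] := List.eq_nil_of_length_eq_zero (Nat.le_zero.mp hl)
      simp [this, altGen, specTok]
  | succ n ih =>
      intro l hl
      cases l with
      | nil => simp [altGen, specTok]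
      | cons x xs =>
          by_cases hx : pvIsCol x
          · cases xs with
            | nil => simp [altGen, altRun, specTok, hx]
            | cons y r =>
                by_cases hy : pvIsCol y
                · rw [altGen, if_pos hx]
                  simp only [List.takeWhile_cons, hy, if_pos, List.dropWhile_cons]
                  have hyr : altGen (y :: r) =
                      altRun (y :: r.takeWhile pvIsCol) ++ altGen (r.dropWhile pvIsCol) := by
                    rw [altGen, if_pos hy]
                  have ihy : altGen (y :: r) = specTok (y :: r) := by
                    apply ih; simp at hl ⊢; omega
                  rw [show altRun (x :: y :: r.takeWhile pvIsCol)
                        = x :: "," :: altRun (y :: r.takeWhile pvIsCol) from rfl]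
                  simp only [List.cons_append, ← hyr, ihy]
                  simp [specTok, hx, hy]
                · rw [altGen, if_pos hx]
                  simp only [List.takeWhile_cons, hy, List.dropWhile_cons, ite_false,
                    Bool.false_eq_true]
                  have ihy : altGen (y :: r) = specTok (y :: r) := by
                    apply ih; simp at hl ⊢; omega
                  simp [altRun, ihy, specTok, hx, hy]
          · rw [altGen, if_neg hx]
            have ihx : altGen xs = specTok xs := by
              apply ih; simp at hl; omega
            rw [ihx]
            cases xs with
            | nil => simp [specTok, hx]
            | cons y r => simp [specTok, hx]

-- ===== VERDICT (by name: the statement is the Claim_ definition above) =====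
theorem table_text_encoding_spec : Claim_equal_table_text_encoding := by
  intro l _
  unfold Spec_table_text_encoding table_text_encoding table_text_encoding_alt
  rw [foldA_eq]
  have hA := tokA_eq l l 0 (by simp)
  rw [show ((0 : Nat) : Int) = (0 : Int) from rfl] at hA
  refine Prod.ext ?_ ?_
  · show (PySem.List.enumerate l 0).flatMap (gtokA l) = altGen l
    rw [hA, altGen_eq_aux l.length l le_rfl]
  · show [] ++ (List.replicate (PySem.List.enumerate l 0).length [true, false]).flatten = _
    rw [PySem.List.length_enumerate]
    simp
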